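-- pv_equiv track=rewrite | github.com/Julian-JJ/LLM_Look_Ahead_Classification | scripts/dataset_processing.py | modify_pubmed_format
-- ===== SOURCE A (Python) =====
-- def modify_pubmed_format(text_array, index_array):
--     """Changes the format of Pubmed-formatted data
--
--     Keyword arguments:
--     text_array -- array of either labels or sentences to be grouped into sections
--     index_array -- array of numbers which act as deminators between different data sources
--     """
--     return_array=[]
--     append_array=[]
--     i = 1
--     append_array.append(text_array[0])
--     while(i<len(text_array)):
--         #Loops through text
--         #Whenever index_array decreases, start new group of sentences
--         if(index_array[i]>index_array[i-1]):
--             append_array.append(text_array[i])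
--         else:
--             return_array.append(append_array)
--             append_array=[]
--             append_array.append(text_array[i])
--         i=i+1
--     return_array.append(append_array)
--     return return_array
-- ===== SOURCE B (Python) =====
-- def modify_pubmed_format(text_array, index_array):
--     """Changes the format of Pubmed-formatted data
--
--     Single scan collecting the group-boundary positions, then one slicing pass.
--     """
--     boundaries = [0]
--     for i in range(1, len(text_array)):
--         if index_array[i] <= index_array[i - 1]:
--             boundaries.append(i)
--     boundaries.append(len(text_array))
--     return [text_array[a:b] for a, b in zip(boundaries, boundaries[1:])]
-- ===== Notes on version B (the rewrite author's own statement) =====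
-- stated objective: alternative
-- what changed: Instead of growing the current group while looping (accumulator of lists), B makes one scan that only records boundary positions where the index fails to increase, then builds the groups by slicing between consecutive boundaries.
import Mathlib
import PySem

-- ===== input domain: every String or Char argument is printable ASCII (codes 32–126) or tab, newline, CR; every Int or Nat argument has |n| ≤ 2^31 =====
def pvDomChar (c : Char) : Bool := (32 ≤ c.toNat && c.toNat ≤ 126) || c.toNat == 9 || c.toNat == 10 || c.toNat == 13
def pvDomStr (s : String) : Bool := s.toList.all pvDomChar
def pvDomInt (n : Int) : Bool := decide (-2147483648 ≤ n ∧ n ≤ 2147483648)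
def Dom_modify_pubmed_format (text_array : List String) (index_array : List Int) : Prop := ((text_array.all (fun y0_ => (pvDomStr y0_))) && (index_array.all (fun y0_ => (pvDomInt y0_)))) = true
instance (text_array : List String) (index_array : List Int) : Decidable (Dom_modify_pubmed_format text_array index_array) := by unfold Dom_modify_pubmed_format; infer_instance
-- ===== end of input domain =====

-- B records only the boundary positions in one scan and builds the groups by slicing, instead of growing the current group in an accumulator; equivalent, same cost.


-- ===== PORT A =====
def modify_pubmed_format (text_array : List String) (index_array : List Int) : List (List String) :=
  let st := (PySem.List.pyRange 1 (text_array.length : Int) 1).foldl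
    (fun (s : List (List String) × List String) i =>
      if PySem.List.pyGetD index_array i 0 > PySem.List.pyGetD index_array (i-1) 0 then
        (s.1, s.2 ++ [PySem.List.pyGetD text_array i ""])
      else
        (s.1 ++ [s.2], [PySem.List.pyGetD text_array i ""]))
    ([], [PySem.List.pyGetD text_array 0 ""])
  st.1 ++ [st.2]

-- ===== PORT B =====
def modify_pubmed_format_alt (text_array : List String) (index_array : List Int) : List (List String) :=
  let bnd := (PySem.List.pyRange 1 (text_array.length : Int) 1).foldl
    (fun (b : List Int) i =>
      if PySem.List.pyGetD index_array i 0 ≤ PySem.List.pyGetD index_array (i-1) 0 then b ++ [i] else b)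
    [0]
  let bnd := bnd ++ [(text_array.length : Int)]
  (bnd.zip bnd.tail).map (fun p => PySem.List.slice text_array (some p.1) (some p.2))

-- ===== PRECONDITION & SPEC =====
-- Pre_ excludes exactly the inputs where Python A raises IndexError: empty text_array,
-- or index_array shorter than a text_array of length ≥ 2.
def Pre_modify_pubmed_format (text_array : List String) (index_array : List Int) : Prop :=
  text_array ≠ [] ∧ (text_array.length = 1 ∨ text_array.length ≤ index_array.length)
instance (text_array : List String) (index_array : List Int) : Decidable (Pre_modify_pubmed_format text_array index_array) := by unfold Pre_modify_pubmed_format; infer_instance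
def pvWitness_modify_pubmed_format : List String × List Int := (["a", "b", "c"], [0, 1, 0])

def Spec_modify_pubmed_format (text_array : List String) (index_array : List Int) (out : List (List String)) : Prop := out = modify_pubmed_format_alt text_array index_array
instance (text_array : List String) (index_array : List Int) (out : List (List String)) : Decidable (Spec_modify_pubmed_format text_array index_array out) := by unfold Spec_modify_pubmed_format; infer_instance

-- ===== CLAIM (what is proved, stated in full; the proofs are below) =====
def Claim_equal_modify_pubmed_format : Prop := ∀ (text_array : List String) (index_array : List Int), Dom_modify_pubmed_format text_array index_array → Pre_modify_pubmed_format text_array index_array → Spec_modify_pubmed_format text_array index_array (modify_pubmed_format text_array index_array)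

-- ===== LEMMAS AND PROOFS =====

-- zip-with-tail of a snocced list peels the last adjacent pair
lemma zip_tail_snoc : ∀ (bs : List Int) (m y : Int),
    (bs ++ [m, y]).zip (bs ++ [m, y]).tail = (bs ++ [m]).zip (bs ++ [m]).tail ++ [(m, y)]
  | [], m, y => by simp
  | a :: bs, m, y => by
    cases bs with
    | nil => simp
    | cons c bs' =>
      have ih := zip_tail_snoc (c :: bs') m y
      simp only [List.cons_append, List.tail_cons, List.zip_cons_cons] at *
      exact congrArg (List.cons (a, c)) ih

-- extending a slice by one element
lemma slice_snoc (t : List String) (m : Int) (n : Nat) (h0 : 0 ≤ m) (hmn : m.toNat ≤ n)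
    (hn : n < t.length) :
    PySem.List.slice t (some m) (some ((n : Int) + 1)) =
      PySem.List.slice t (some m) (some (n : Int)) ++ [t.getD n ""] := by
  rw [PySem.List.slice_toNat _ h0 (by positivity), PySem.List.slice_toNat _ h0 (by positivity)]
  have h1 : ((n : Int) + 1).toNat = n + 1 := by omega
  have h2 : ((n : Int)).toNat = n := by omega
  rw [h1, h2, Nat.succ_sub hmn, List.take_add_one]
  have hlt : m.toNat + (n - m.toNat) < t.length := by omega
  have : (t.drop m.toNat)[n - m.toNat]? = some t[n] := by
    rw [List.getElem?_drop, List.getElem?_eq_getElem hlt]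
    congr 1
    congr 1
    omega
  rw [this]
  simp [List.getD, List.getElem?_eq_getElem hn]

lemma mpf_inv (t : List String) (idx : List Int) :
    ∀ (n : Nat), 1 ≤ n → n ≤ t.length →
    ∃ bs m,
      ((PySem.List.pyRange 1 (n : Int) 1).foldl
        (fun (b : List Int) i =>
          if PySem.List.pyGetD idx i 0 ≤ PySem.List.pyGetD idx (i-1) 0 then b ++ [i] else b)
        [0]) = bs ++ [m] ∧
      0 ≤ m ∧ m < (n : Int) ∧
      ((PySem.List.pyRange 1 (n : Int) 1).foldl
        (fun (s : List (List String) × List String) i =>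
          if PySem.List.pyGetD idx i 0 > PySem.List.pyGetD idx (i-1) 0 then
            (s.1, s.2 ++ [PySem.List.pyGetD t i ""])
          else
            (s.1 ++ [s.2], [PySem.List.pyGetD t i ""]))
        ([], [PySem.List.pyGetD t 0 ""]))
      = (((bs ++ [m]).zip (bs ++ [m]).tail).map
            (fun p => PySem.List.slice t (some p.1) (some p.2)),
         PySem.List.slice t (some m) (some (n : Int))) := by
  intro n h1
  induction n, h1 using Nat.le_induction with
  | base =>
    intro hlen
    refine ⟨[], 0, ?_, le_refl 0, by norm_num, ?_⟩
    · simp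
    · obtain ⟨x, t', rfl⟩ : ∃ x t', t = x :: t' := by
        cases t with
        | nil => simp at hlen
        | cons x t' => exact ⟨x, t', rfl⟩
      simp [PySem.List.slice, PySem.List.clampIdx]
  | succ n h1 ih =>
    intro hlen
    have hn : n ≤ t.length := by omega
    have hnlt : n < t.length := by omega
    obtain ⟨bs, m, hB, hm0, hmn, hA⟩ := ih hn
    have hrange : PySem.List.pyRange 1 ((n + 1 : Nat) : Int) 1 =
        PySem.List.pyRange 1 (n : Int) 1 ++ [(n : Int)] := by
      push_cast
      exact PySem.List.pyRange_one_succ_right (by exact_mod_cast h1)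
    rw [hrange, List.foldl_append, List.foldl_append, hB, hA]
    simp only [List.foldl_cons, List.foldl_nil]
    by_cases hc : PySem.List.pyGetD idx (n : Int) 0 ≤ PySem.List.pyGetD idx ((n : Int) - 1) 0
    · -- boundary at n: B appends n, A closes the current group
      refine ⟨bs ++ [m], (n : Int), ?_, by positivity, by push_cast; omega, ?_⟩
      · rw [if_pos hc]
      · rw [if_neg (by exact not_lt.mpr hc)]
        have hz := zip_tail_snoc bs m (n : Int)
        have : bs ++ [m] ++ [(n : Int)] = bs ++ [m, (n : Int)] := by simp
        rw [this, hz]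
        simp only [Prod.mk.injEq]
        refine ⟨?_, ?_⟩
        · simp
        · rw [PySem.List.slice_toNat t (by positivity) (by positivity)]
          have h2 : ((n : Int)).toNat = n := by omega
          have h3 : (((n + 1 : Nat)) : Int).toNat = n + 1 := by omega
          rw [h2, h3, Nat.add_sub_cancel_left]
          simp [PySem.List.pyGetD_natCast, List.take_one, List.head?_drop, List.getD,
            List.getElem?_eq_getElem hnlt]
    · -- no boundary: B unchanged, A extends the current group
      refine ⟨bs, m, ?_, hm0, by push_cast; omega, ?_⟩
      · rw [if_neg hc]
      · rw [if_pos (by exact lt_of_not_ge hc)]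
        simp only [Prod.mk.injEq]
        refine ⟨?_, ?_⟩
        · trivial
        · have hsnoc := slice_snoc t m n hm0 (by omega) hnlt
          push_cast
          rw [hsnoc]
          simp [PySem.List.pyGetD_natCast, List.getD]

-- ===== VERDICT (by name: the statement is the Claim_ definition above) =====
theorem modify_pubmed_format_spec : Claim_equal_modify_pubmed_format := by
  intro t idx _ hpre
  have ht : t ≠ [] := hpre.1
  have hlen : 1 ≤ t.length := List.length_pos_iff.mpr ht
  obtain ⟨bs, m, hB, hm0, hmn, hA⟩ := mpf_inv t idx t.length hlen le_rfl
  show modify_pubmed_format t idx = modify_pubmed_format_alt t idx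
  unfold modify_pubmed_format modify_pubmed_format_alt
  simp only [hB, hA]
  have : bs ++ [m] ++ [(t.length : Int)] = bs ++ [m, (t.length : Int)] := by simp
  rw [this, zip_tail_snoc]
  simp
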